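-- pv_equiv track=rewrite | github.com/SongHyungJin/GraduationProject_master | GraduateProj.py | pb_search
-- ===== SOURCE A (Python) =====
-- from typing import List, Optional, Tuple, Dict
--
-- def pb_search(lines: List[str], queries: List[str], topn: int = 100) -> List[str]:
--     if not lines or not queries: return []
--     q = " ".join([q for q in queries if q]).lower().split()
--     q = list(dict.fromkeys(q))
--     scored=[]
--     for s in lines:
--         t=s.lower()
--         score=sum(1 for token in q if token and token in t)
--         if score>0: scored.append((score,s))
--     scored.sort(key=lambda x:x[0], reverse=True)
--     return [s for _,s in scored[:topn]]
-- ===== SOURCE B (Python) =====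
-- def pb_search(lines, queries, topn=100):
--     if not lines or not queries:
--         return []
--     q = list(dict.fromkeys(" ".join([x for x in queries if x]).lower().split()))
--     buckets = [[] for _ in range(len(q) + 1)]
--     for s in lines:
--         t = s.lower()
--         score = 0
--         for tok in q:
--             if tok in t:
--                 score += 1
--         if score != 0:
--             buckets[score].append(s)
--     out = []
--     for sc in range(len(q), 0, -1):
--         out.extend(buckets[sc])
--     return out[:topn]
-- ===== Notes on version B (the rewrite author's own statement) =====
-- stated objective: alternative
-- what changed: Replaces A's stable reverse comparison sort of (score, line) pairs with a counting/bucket pass: one bucket per possible score (0..len(q)), lines appended in input order, buckets concatenated from highest score down, which reproduces the stable descending order exactly.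
import Mathlib
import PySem

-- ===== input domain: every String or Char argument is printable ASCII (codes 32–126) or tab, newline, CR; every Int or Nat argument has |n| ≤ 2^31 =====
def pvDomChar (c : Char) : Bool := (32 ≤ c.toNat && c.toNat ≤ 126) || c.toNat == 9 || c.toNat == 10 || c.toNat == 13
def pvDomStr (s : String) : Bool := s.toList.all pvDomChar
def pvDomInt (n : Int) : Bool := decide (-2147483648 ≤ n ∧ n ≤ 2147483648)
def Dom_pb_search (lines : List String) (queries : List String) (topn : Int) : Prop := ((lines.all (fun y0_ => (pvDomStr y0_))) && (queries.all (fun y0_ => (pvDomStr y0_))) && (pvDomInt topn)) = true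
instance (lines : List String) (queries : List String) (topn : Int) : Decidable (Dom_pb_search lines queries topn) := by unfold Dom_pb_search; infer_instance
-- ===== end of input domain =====

-- B replaces A's stable reverse comparison sort of (score, line) pairs by a counting/bucket
-- pass (one bucket per possible score, concatenated from the highest score down), which
-- yields the same result by stability; objective: alternative.

-- ===== PORT A =====
def pb_search (lines : List String) (queries : List String) (topn : Int) : List String :=
  if lines = [] ∨ queries = [] then []
  else
    let q := PySem.List.dedup (PySem.Str.split₀ (PySem.Str.lower
               (PySem.Str.join " " (queries.filter (fun x => decide (x ≠ ""))))))
    let scored := lines.foldl (fun acc s =>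
        let t := PySem.Str.lower s
        let score : Int :=
          ((q.filter (fun token => decide (token ≠ "") && PySem.Str.isIn token t)).map
            (fun _ => (1 : Int))).sum
        if score > 0 then acc ++ [(score, s)] else acc) []
    let scoredSorted := PySem.List.sorted scored (fun x => x.1) true
    (PySem.List.slice scoredSorted none (some topn)).map (fun x => x.2)

-- ===== PORT B =====
def pb_search_alt (lines : List String) (queries : List String) (topn : Int) : List String :=
  if lines = [] ∨ queries = [] then []
  else
    let q := PySem.List.dedup (PySem.Str.split₀ (PySem.Str.lower
               (PySem.Str.join " " (queries.filter (fun x => decide (x ≠ ""))))))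
    let buckets := lines.foldl (fun bs s =>
        let t := PySem.Str.lower s
        let score := q.foldl (fun n tok => if PySem.Str.isIn tok t then n + 1 else n) (0 : Nat)
        if score ≠ 0 then bs.set score (bs.getD score [] ++ [s]) else bs)
      (List.replicate (q.length + 1) ([] : List String))
    let out := (PySem.List.pyRange (q.length : Int) 0 (-1)).foldl
        (fun acc sc => acc ++ PySem.List.pyGetD buckets sc []) []
    PySem.List.slice out none (some topn)

-- ===== PRECONDITION & SPEC =====
def Spec_pb_search (lines : List String) (queries : List String) (topn : Int) (out : List String) : Prop := out = pb_search_alt lines queries topn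
instance (lines : List String) (queries : List String) (topn : Int) (out : List String) : Decidable (Spec_pb_search lines queries topn out) := by unfold Spec_pb_search; infer_instance

-- ===== CLAIM (what is proved, stated in full; the proofs are below) =====
def Claim_equal_pb_search : Prop := ∀ (lines : List String) (queries : List String) (topn : Int), Dom_pb_search lines queries topn → Spec_pb_search lines queries topn (pb_search lines queries topn)

-- ===== LEMMAS AND PROOFS =====

-- number of query tokens occurring in t
def cntQ (q : List String) (t : String) : Nat := q.countP (fun tok => PySem.Str.isIn tok t)

-- every chunk produced by split₀.go is a nonempty character list
lemma split0_go_ne_nil : ∀ (cs : List Char) (cur : List Char) (acc : List (List Char)),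
    (∀ u ∈ acc, u ≠ []) → ∀ u ∈ PySem.Chars.split₀.go cs cur acc, u ≠ [] := by
  intro cs
  induction cs with
  | nil =>
    intro cur acc hacc u hu
    simp only [PySem.Chars.split₀.go] at hu
    by_cases hc : cur.isEmpty
    · rw [if_pos hc, List.mem_reverse] at hu; exact hacc u hu
    · rw [if_neg hc, List.mem_reverse] at hu
      rcases List.mem_cons.mp hu with h | h
      · subst h; simpa [List.isEmpty_iff] using hc
      · exact hacc u h
  | cons c rest ih =>
    intro cur acc hacc u hu
    simp only [PySem.Chars.split₀.go] at hu
    by_cases hs : PySem.Chars.isspace c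
    · rw [if_pos hs] at hu
      by_cases hc : cur.isEmpty
      · rw [if_pos hc] at hu; exact ih [] acc hacc u hu
      · rw [if_neg hc] at hu
        refine ih [] (cur.reverse :: acc) ?_ u hu
        intro v hv
        rcases List.mem_cons.mp hv with h | h
        · subst h; simpa [List.isEmpty_iff] using hc
        · exact hacc v h
    · rw [if_neg hs] at hu; exact ih (c :: cur) acc hacc u hu

-- tokens of split₀ are nonempty strings
lemma mem_split0_ne (s : String) : ∀ tok ∈ PySem.Str.split₀ s, tok ≠ "" := by
  intro tok htok
  simp only [PySem.Str.split₀, List.mem_map] at htok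
  obtain ⟨u, hu, rfl⟩ := htok
  have hne : u ≠ [] := split0_go_ne_nil _ _ _ (by simp) u hu
  intro h
  apply hne
  have := congrArg String.toList h
  simpa [String.toList_ofList] using this

-- A's per-line score generator equals cntQ (all query tokens are nonempty)
lemma scoreA_eq (q : List String) (hq : ∀ tok ∈ q, tok ≠ "") (t : String) :
    ((q.filter (fun token => decide (token ≠ "") && PySem.Str.isIn token t)).map
      (fun _ => (1 : Int))).sum = (cntQ q t : Int) := by
  rw [List.filter_congr (q := fun tok => PySem.Str.isIn tok t)
        (fun x hx => by simp [hq x hx])]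
  rw [PySem.List.sum_map_const_int, cntQ, List.countP_eq_length_filter]
  simp

-- B's per-line counting loop equals cntQ
lemma foldl_count_nat {α : Type} (p : α → Bool) :
    ∀ (l : List α) (n : Nat), l.foldl (fun n x => if p x then n + 1 else n) n = n + l.countP p := by
  intro l
  induction l with
  | nil => simp
  | cons a l ih =>
    intro n
    by_cases h : p a
    · simp [h, ih]
      omega
    · simp [h, ih]

-- insertBy skips a prefix none of whose elements satisfy `before x ·`
lemma insertBy_append_left {α : Type} (before : α → α → Bool) (x : α) :
    ∀ (as bs : List α), (∀ y ∈ as, before x y = false) →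
      PySem.List.insertBy before x (as ++ bs) = as ++ PySem.List.insertBy before x bs := by
  intro as
  induction as with
  | nil => simp
  | cons a as ih =>
    intro bs h
    simp only [List.cons_append, PySem.List.insertBy, h a (by simp)]
    simp only [Bool.false_eq_true, if_false]
    rw [ih bs (fun y hy => h y (by simp [hy]))]

-- insertBy puts x in front when every element satisfies `before x ·`
lemma insertBy_all_before {α : Type} (before : α → α → Bool) (x : α) :
    ∀ (ys : List α), (∀ y ∈ ys, before x y = true) →
      PySem.List.insertBy before x ys = x :: ys := by
  intro ys h
  cases ys with
  | nil => simp [PySem.List.insertBy]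
  | cons a ys => simp [PySem.List.insertBy, h a (by simp)]

-- inserting into a concatenation of strictly-descending key buckets appends x to its bucket
lemma insert_buckets {α : Type} (key : α → Int) (x : α) :
    ∀ (ks : List Int) (f : Int → List α),
      ks.Pairwise (· > ·) → (∀ k ∈ ks, ∀ y ∈ f k, key y = k) → key x ∈ ks →
      PySem.List.insertBy (fun a b => decide (key b < key a)) x (ks.flatMap f)
        = ks.flatMap (fun k => f k ++ if key x = k then [x] else []) := by
  intro ks
  induction ks with
  | nil => intro f _ _ hx; simp at hx
  | cons k ks ih =>
    intro f hp hf hx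
    have hhead : ∀ k' ∈ ks, k > k' := (List.pairwise_cons.mp hp).1
    have htail : ks.Pairwise (· > ·) := (List.pairwise_cons.mp hp).2
    simp only [List.flatMap_cons]
    by_cases hk : key x = k
    · have h1 : ∀ y ∈ f k, (fun a b => decide (key b < key a)) x y = false := by
        intro y hy
        have := hf k (by simp) y hy
        simp [this, hk]
      rw [insertBy_append_left _ _ _ _ h1]
      have h2 : ∀ y ∈ ks.flatMap f, (fun a b => decide (key b < key a)) x y = true := by
        intro y hy
        obtain ⟨k', hk', hy'⟩ := List.mem_flatMap.mp hy
        have := hf k' (by simp [hk']) y hy'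
        simp [this, hk]
        exact hhead k' hk'
      rw [insertBy_all_before _ _ _ h2]
      have h3 : ks.flatMap (fun k' => f k' ++ if key x = k' then [x] else []) = ks.flatMap f := by
        apply List.flatMap_congr
        intro k' hk'
        have : key x ≠ k' := by have := hhead k' hk'; omega
        simp [this]
      rw [h3, if_pos hk]
      simp
    · have hx' : key x ∈ ks := (List.mem_cons.mp hx).resolve_left hk
      have hlt : k > key x := hhead _ hx'
      have h1 : ∀ y ∈ f k, (fun a b => decide (key b < key a)) x y = false := by
        intro y hy
        have := hf k (by simp) y hy
        simp [this]
        omega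
      rw [insertBy_append_left _ _ _ _ h1,
          ih f htail (fun k' hk' => hf k' (by simp [hk'])) hx', if_neg hk]
      simp

-- a stable reverse sort by an Int key is the concatenation of the descending key buckets
lemma sorted_rev_eq_flatMap {α : Type} (key : α → Int) (ks : List Int)
    (hp : ks.Pairwise (· > ·)) :
    ∀ (xs : List α), (∀ x ∈ xs, key x ∈ ks) →
      PySem.List.sorted xs key true
        = ks.flatMap (fun k => xs.filter (fun x => decide (key x = k))) := by
  intro xs
  induction xs using List.reverseRecOn with
  | nil => intro _; rw [PySem.List.sorted_rev_eq_foldl_insertBy]; simp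
  | append_singleton xs x ih =>
    intro h
    rw [PySem.List.sorted_rev_eq_foldl_insertBy, List.foldl_append]
    simp only [List.foldl_cons, List.foldl_nil]
    rw [← PySem.List.sorted_rev_eq_foldl_insertBy,
        ih (fun y hy => h y (by simp [hy]))]
    rw [insert_buckets key x ks _ hp
          (fun k _ y hy => by
            have := (List.mem_filter.mp hy).2
            exact of_decide_eq_true this)
          (h x (by simp))]
    apply List.flatMap_congr
    intro k _
    rw [List.filter_append]
    by_cases hk : key x = k <;> simp [hk]

-- setting one entry of a range-indexed table
lemma set_map_range {α : Type} (n c : Nat) (f : Nat → α) (v : α) (_hc : c < n) :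
    ((List.range n).map f).set c v = (List.range n).map (fun k => if k = c then v else f k) := by
  apply List.ext_getElem (by simp)
  intro i h1 h2
  simp only [List.getElem_set, List.getElem_map, List.getElem_range]
  by_cases h : c = i
  · subst h; simp
  · rw [if_neg h, if_neg (fun hh => h hh.symm)]

-- the bucket table built by B's first loop, in closed form
lemma buckets_eq (q : List String) :
    ∀ (ls : List String),
      ls.foldl (fun bs s =>
          if cntQ q (PySem.Str.lower s) ≠ 0 then
            bs.set (cntQ q (PySem.Str.lower s))
              (bs.getD (cntQ q (PySem.Str.lower s)) [] ++ [s])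
          else bs)
        (List.replicate (q.length + 1) ([] : List String))
      = (List.range (q.length + 1)).map
          (fun k => if k = 0 then []
                    else ls.filter (fun s => decide (cntQ q (PySem.Str.lower s) = k))) := by
  intro ls
  induction ls using List.reverseRecOn with
  | nil =>
    rw [show (fun k => if k = 0 then ([] : List String) else List.filter (fun s => decide (cntQ q (PySem.Str.lower s) = k)) []) = fun _ => [] from funext (fun k => by simp)]
    rw [List.map_const', List.length_range]
    rfl
  | append_singleton ls s ih =>
    rw [List.foldl_append, List.foldl_cons, List.foldl_nil, ih]
    by_cases hc : cntQ q (PySem.Str.lower s) = 0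
    · rw [if_neg (by simp [hc])]
      apply List.map_congr_left
      intro k hk
      by_cases hk0 : k = 0
      · simp [hk0]
      · rw [if_neg hk0, if_neg hk0, List.filter_append]
        have : decide (cntQ q (PySem.Str.lower s) = k) = false := by
          simp [hc]; omega
        simp [this]
    · have hle : cntQ q (PySem.Str.lower s) ≤ q.length := List.countP_le_length
      have hlt : cntQ q (PySem.Str.lower s) < q.length + 1 := by omega
      rw [if_pos hc]
      have hgetD : ((List.range (q.length + 1)).map
          (fun k => if k = 0 then ([] : List String)
                    else ls.filter (fun s => decide (cntQ q (PySem.Str.lower s) = k)))).getD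
            (cntQ q (PySem.Str.lower s)) []
          = ls.filter (fun s' => decide (cntQ q (PySem.Str.lower s') = cntQ q (PySem.Str.lower s))) := by
        rw [List.getD_eq_getElem?_getD, List.getElem?_map, List.getElem?_range hlt]
        simp [hc]
      rw [hgetD, set_map_range _ _ _ _ hlt]
      apply List.map_congr_left
      intro k hk
      by_cases hkc : k = cntQ q (PySem.Str.lower s)
      · subst hkc
        rw [if_pos rfl, if_neg hc, List.filter_append]
        simp
      · rw [if_neg hkc]
        by_cases hk0 : k = 0
        · simp [hk0]
        · rw [if_neg hk0, if_neg hk0, List.filter_append]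
          have : decide (cntQ q (PySem.Str.lower s) = k) = false := by
            simp; omega
          simp [this]

-- range(Q, 0, -1) = [Q, Q-1, …, 1]
lemma pyRange_desc (Q : Nat) :
    PySem.List.pyRange (Q : Int) 0 (-1) = (List.range Q).map (fun (j : Nat) => (Q : Int) - (j : Int)) := by
  unfold PySem.List.pyRange
  rcases Nat.eq_zero_or_pos Q with h | h
  · subst h; norm_num
  · norm_num [if_pos, sub_eq_add_neg]
    rw [if_pos (by exact_mod_cast h)]

-- slicing commutes with mapping
lemma slice_map_comm {α β : Type} (f : α → β) (xs : List α) (b : Int) :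
    (PySem.List.slice xs none (some b)).map f = PySem.List.slice (xs.map f) none (some b) := by
  simp [PySem.List.slice, PySem.List.clampIdx, List.map_take]

-- A's core (everything after the guard) in closed bucket form
lemma A_core (lines q : List String) (hq : ∀ tok ∈ q, tok ≠ "") (topn : Int) :
    (PySem.List.slice
      (PySem.List.sorted
        (lines.foldl (fun acc s =>
            let t := PySem.Str.lower s
            let score : Int :=
              ((q.filter (fun token => decide (token ≠ "") && PySem.Str.isIn token t)).map
                (fun _ => (1 : Int))).sum
            if score > 0 then acc ++ [(score, s)] else acc) [])
        (fun x => x.1) true)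
      none (some topn)).map (fun x => x.2)
    = PySem.List.slice
        ((List.range q.length).flatMap
          (fun j => lines.filter (fun s => decide (cntQ q (PySem.Str.lower s) = q.length - j))))
        none (some topn) := by
  have hfun : (fun (acc : List (Int × String)) s =>
      let t := PySem.Str.lower s
      let score : Int :=
        ((q.filter (fun token => decide (token ≠ "") && PySem.Str.isIn token t)).map
          (fun _ => (1 : Int))).sum
      if score > 0 then acc ++ [(score, s)] else acc)
      = (fun acc s =>
        if (fun s => decide (0 < cntQ q (PySem.Str.lower s))) s = true then
          acc ++ [(fun s => ((cntQ q (PySem.Str.lower s) : Int), s)) s] else acc) := by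
    funext acc s
    simp only [scoreA_eq q hq]
    by_cases h : 0 < cntQ q (PySem.Str.lower s)
    · rw [if_pos (by exact_mod_cast h), if_pos (by simp [h])]
    · rw [if_neg (by omega), if_neg (by simp; omega)]
  rw [hfun, PySem.List.foldl_append_if, List.nil_append]
  rw [sorted_rev_eq_flatMap (fun (x : Int × String) => x.1)
        ((List.range q.length).map (fun (j : Nat) => (q.length : Int) - (j : Int)))
        (by
          rw [List.pairwise_map]
          exact List.pairwise_lt_range.imp (fun {a b} h => by omega))
        _
        (by
          intro x hx
          simp only [List.mem_map, List.mem_filter] at hx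
          obtain ⟨s, hs, rfl⟩ := hx
          have h1 : 0 < cntQ q (PySem.Str.lower s) := of_decide_eq_true hs.2
          have h2 : cntQ q (PySem.Str.lower s) ≤ q.length := List.countP_le_length
          refine List.mem_map.mpr ⟨q.length - cntQ q (PySem.Str.lower s),
            List.mem_range.mpr (by omega), by push_cast [Nat.cast_sub h2]; ring⟩)]
  rw [slice_map_comm]
  congr 1
  rw [List.map_flatMap, List.flatMap_map]
  apply List.flatMap_congr
  intro j hj
  have hjQ : j < q.length := List.mem_range.mp hj
  rw [List.filter_map, List.map_map]
  rw [show ((fun (x : Int × String) => x.2) ∘ (fun s => ((cntQ q (PySem.Str.lower s) : Int), s))) = fun s => s from rfl]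
  rw [List.map_id', List.filter_filter]
  apply List.filter_congr
  intro s _
  by_cases hc : cntQ q (PySem.Str.lower s) = q.length - j
  · have h1 : 0 < cntQ q (PySem.Str.lower s) := by omega
    have h2 : ((cntQ q (PySem.Str.lower s) : Int)) = (q.length : Int) - j := by
      rw [hc]; push_cast [Nat.cast_sub (by omega : j ≤ q.length)]; ring
    simp [hc]
    omega
  · have h2 : ¬ ((cntQ q (PySem.Str.lower s) : Int)) = (q.length : Int) - j := by
      intro h; apply hc; omega
    simp [hc, h2]

-- B's core (everything after the guard) in closed bucket form
lemma B_core (lines q : List String) (topn : Int) :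
    PySem.List.slice
      ((PySem.List.pyRange (q.length : Int) 0 (-1)).foldl
        (fun acc sc => acc ++ PySem.List.pyGetD
          (lines.foldl (fun bs s =>
              let t := PySem.Str.lower s
              let score := q.foldl (fun n tok => if PySem.Str.isIn tok t then n + 1 else n) (0 : Nat)
              if score ≠ 0 then bs.set score (bs.getD score [] ++ [s]) else bs)
            (List.replicate (q.length + 1) ([] : List String))) sc []) [])
      none (some topn)
    = PySem.List.slice
        ((List.range q.length).flatMap
          (fun j => lines.filter (fun s => decide (cntQ q (PySem.Str.lower s) = q.length - j))))
        none (some topn) := by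
  have hfun : (fun (bs : List (List String)) s =>
      let t := PySem.Str.lower s
      let score := q.foldl (fun n tok => if PySem.Str.isIn tok t then n + 1 else n) (0 : Nat)
      if score ≠ 0 then bs.set score (bs.getD score [] ++ [s]) else bs)
      = (fun bs s =>
        if cntQ q (PySem.Str.lower s) ≠ 0 then
          bs.set (cntQ q (PySem.Str.lower s))
            (bs.getD (cntQ q (PySem.Str.lower s)) [] ++ [s])
        else bs) := by
    funext bs s
    have : q.foldl (fun n tok => if PySem.Str.isIn tok (PySem.Str.lower s) then n + 1 else n) (0 : Nat)
        = cntQ q (PySem.Str.lower s) := by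
      rw [foldl_count_nat]; simp [cntQ]
    simp only [this]
  rw [hfun, buckets_eq, pyRange_desc, PySem.List.foldl_append_eq_flatMap, List.nil_append]
  simp only [List.flatMap_map]
  congr 1
  apply List.flatMap_congr
  intro j hj
  have hjQ : j < q.length := List.mem_range.mp hj
  have hnn : (0 : Int) ≤ (q.length : Int) - j := by omega
  have hlt : (q.length : Int) - j < ((List.range (q.length + 1)).map
      (fun k => if k = 0 then ([] : List String)
                else lines.filter (fun s => decide (cntQ q (PySem.Str.lower s) = k)))).length := by
    simp
  rw [PySem.List.pyGetD_eq_getElem _ _ hnn hlt]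
  have htn : ((q.length : Int) - j).toNat = q.length - j := by omega
  simp only [List.getElem_map, List.getElem_range, htn]
  rw [if_neg (by omega)]

theorem pb_search_spec : Claim_equal_pb_search := by
  intro lines queries topn _
  unfold Spec_pb_search pb_search pb_search_alt
  by_cases hg : lines = [] ∨ queries = []
  · rw [if_pos hg, if_pos hg]
  · rw [if_neg hg, if_neg hg]
    have hq : ∀ tok ∈ PySem.List.dedup (PySem.Str.split₀ (PySem.Str.lower
        (PySem.Str.join " " (queries.filter (fun x => decide (x ≠ "")))))), tok ≠ "" := by
      intro tok htok
      exact mem_split0_ne _ tok ((PySem.List.mem_dedup _ _).mp htok)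
    rw [A_core lines _ hq topn, B_core lines _ topn]
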